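-- pv_equiv track=rewrite | github.com/hollomancer/sbir-analytics | scripts/fix_markdown.py | fix_code_fence_language
-- ===== SOURCE A (Python) =====
-- def fix_code_fence_language(content: str) -> str:
--     """Fix MD040: Fenced code blocks should have a language specified."""
--     # Pattern to match code fences without language
--     lines = content.split("\n")
--     result = []
--     in_code_block = False
--
--     for _i, line in enumerate(lines):
--         stripped = line.strip()
--         if stripped.startswith("```") and not in_code_block:
--             # Check if it has a language tag
--             if stripped == "```" or stripped == "``` ":
--                 # Add 'text' as default language
--                 indent = len(line) - len(line.lstrip())
--                 result.append(" " * indent + "```text")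
--             else:
--                 result.append(line)
--             in_code_block = True
--         elif stripped.startswith("```") and in_code_block:
--             result.append(line)
--             in_code_block = False
--         else:
--             result.append(line)
--
--     return "\n".join(result)
-- ===== SOURCE B (Python) =====
-- def fix_code_fence_language(content: str) -> str:
--     """Fix MD040: add 'text' to unmarked opening code fences (two-pass index/parity table)."""
--     lines = content.split("\n")
--     fences = [i for i, line in enumerate(lines) if line.strip().startswith("```")]
--     openers = fences[::2]
--     out = []
--     for i, line in enumerate(lines):
--         if i in openers and line.strip() in ("```", "``` "):
--             indent = len(line) - len(line.lstrip())
--             out.append(" " * indent + "```text")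
--         else:
--             out.append(line)
--     return "\n".join(out)
-- ===== Notes on version B (the rewrite author's own statement) =====
-- stated objective: alternative
-- what changed: Replaces the running in_code_block boolean state machine with a two-pass scheme: first collect the indices of all fence lines, take every other one (the opening fences) as a table, then map over the lines replacing a line only when its index is in that table and it is a bare fence.
import Mathlib
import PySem

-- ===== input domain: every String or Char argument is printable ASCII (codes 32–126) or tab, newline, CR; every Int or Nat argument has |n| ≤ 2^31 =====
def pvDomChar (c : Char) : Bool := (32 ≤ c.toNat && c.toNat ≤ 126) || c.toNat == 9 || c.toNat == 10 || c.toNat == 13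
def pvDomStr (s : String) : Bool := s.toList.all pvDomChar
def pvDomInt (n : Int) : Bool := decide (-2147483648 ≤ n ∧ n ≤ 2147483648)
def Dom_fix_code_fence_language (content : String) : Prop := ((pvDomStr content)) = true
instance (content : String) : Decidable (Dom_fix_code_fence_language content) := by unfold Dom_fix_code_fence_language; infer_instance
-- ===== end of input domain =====

-- B replaces A's running in_code_block boolean with a two-pass index/parity table of the
-- fence lines (objective: alternative decomposition, same result).

-- ===== PORT A =====
-- " " * indent + "```text" (indent = len(line) - len(line.lstrip())); String.mk (List.replicate …) is exact for this nonnegative count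
def pvOpenText (line : String) : String :=
  let indent := PySem.Str.len line - PySem.Str.len (PySem.Str.lstrip line)
  String.ofList (List.replicate indent.toNat ' ') ++ "```text"  -- indent ≥ 0 (lstrip never lengthens), so toNat is exact

-- the body of A's for-loop, on the state (result, in_code_block)
def pvStepA (st : List String × Bool) (line : String) : List String × Bool :=
  let stripped := PySem.Str.strip line
  if PySem.Str.startswith stripped "```" && !st.2 then
    if stripped == "```" || stripped == "``` " then
      (st.1 ++ [pvOpenText line], true)
    else
      (st.1 ++ [line], true)
  else if PySem.Str.startswith stripped "```" && st.2 then
    (st.1 ++ [line], false)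
  else
    (st.1 ++ [line], st.2)

def fix_code_fence_language (content : String) : String :=
  let lines := (PySem.Str.split? content "\n").getD []
  let res := lines.foldl pvStepA ([], false)
  PySem.Str.join "\n" res.1

-- ===== PORT B =====
def pvIsFence (line : String) : Bool := PySem.Str.startswith (PySem.Str.strip line) "```"

def pvBare (line : String) : Bool :=
  PySem.Str.strip line == "```" || PySem.Str.strip line == "``` "

-- hand port of the slice fences[::2] (every element at an even position); exact for step 2
def pvEveryOther {α : Type} : List α → List α
  | [] => []
  | [a] => [a]
  | a :: _ :: r => a :: pvEveryOther r

def fix_code_fence_language_alt (content : String) : String :=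
  let lines := (PySem.Str.split? content "\n").getD []
  let fences := ((PySem.List.enumerate lines 0).filter (fun p => pvIsFence p.2)).map (·.1)
  let openers := pvEveryOther fences
  let out := (PySem.List.enumerate lines 0).map (fun p =>
    if openers.contains p.1 && pvBare p.2 then pvOpenText p.2 else p.2)
  PySem.Str.join "\n" out

-- ===== PRECONDITION & SPEC =====
def Spec_fix_code_fence_language (content : String) (out : String) : Prop := out = fix_code_fence_language_alt content
instance (content : String) (out : String) : Decidable (Spec_fix_code_fence_language content out) := by unfold Spec_fix_code_fence_language; infer_instance

-- ===== CLAIM (what is proved, stated in full; the proofs are below) =====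
def Claim_equal_fix_code_fence_language : Prop := ∀ (content : String), Dom_fix_code_fence_language content → Spec_fix_code_fence_language content (fix_code_fence_language content)

-- ===== LEMMAS AND PROOFS =====

-- reference form: one pass carrying the COUNT of fence lines seen so far
def pvSpecRun : List String → Nat → List String
  | [], _ => []
  | l :: rest, c =>
    (if pvIsFence l && (c % 2 == 0) && pvBare l then pvOpenText l else l)
      :: pvSpecRun rest (if pvIsFence l then c + 1 else c)

-- the indices (from s) of the fence lines
def pvFenceIdx (s : Int) : List String → List Int
  | [] => []
  | l :: rest => if pvIsFence l then s :: pvFenceIdx (s + 1) rest else pvFenceIdx (s + 1) rest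

def pvOdds {α : Type} : List α → List α
  | [] => []
  | _ :: r => pvEveryOther r

lemma pvMem_everyOther {α : Type} {x : α} {l : List α} (h : x ∈ pvEveryOther l) : x ∈ l := by
  induction l using pvEveryOther.induct with
  | case1 => simp [pvEveryOther] at h
  | case2 a => simp only [pvEveryOther] at h; exact h
  | case3 a b r ih =>
    simp only [pvEveryOther, List.mem_cons] at h ⊢
    rcases h with h | h
    · exact Or.inl h
    · exact Or.inr (Or.inr (ih h))

lemma pvMem_odds {α : Type} {x : α} {l : List α} (h : x ∈ pvOdds l) : x ∈ l := by
  cases l with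
  | nil => simp [pvOdds] at h
  | cons a r => exact List.mem_cons_of_mem a (pvMem_everyOther (by simpa [pvOdds] using h))

lemma pvFenceIdx_ge (s : Int) (lines : List String) : ∀ i ∈ pvFenceIdx s lines, s ≤ i := by
  induction lines generalizing s with
  | nil => simp [pvFenceIdx]
  | cons l rest ih =>
    intro i hi
    simp only [pvFenceIdx] at hi
    split at hi
    · rcases List.mem_cons.1 hi with h | h
      · omega
      · have := ih (s + 1) i h; omega
    · have := ih (s + 1) i hi; omega

lemma pvFilterMap_eq_fenceIdx (lines : List String) (s : Int) :
    ((PySem.List.enumerate lines s).filter (fun p => pvIsFence p.2)).map (·.1)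
      = pvFenceIdx s lines := by
  induction lines generalizing s with
  | nil => simp [PySem.List.enumerate_nil, pvFenceIdx]
  | cons l rest ih =>
    simp only [PySem.List.enumerate_cons, List.filter_cons, pvFenceIdx]
    by_cases h : pvIsFence l = true
    · simp [h, ih]
    · simp [h, ih]

-- A's fold equals the counter run
lemma pvA_loop (lines : List String) (res : List String) (c : Nat) :
    (lines.foldl pvStepA (res, decide (c % 2 = 1))).1 = res ++ pvSpecRun lines c := by
  induction lines generalizing res c with
  | nil => simp [pvSpecRun]
  | cons l rest ih =>
    rw [List.foldl_cons]
    by_cases hf : PySem.Chars.startswith (PySem.Chars.strip l.toList) ['`', '`', '`'] = true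
    · by_cases hc : c % 2 = 0
      · have h2 : decide (c % 2 = 1) = false := by simp; omega
        have h3 : decide ((c + 1) % 2 = 1) = true := by simp; omega
        by_cases h1 : (PySem.Str.strip l == "```" || PySem.Str.strip l == "``` ") = true
        · have hstep : pvStepA (res, decide (c % 2 = 1)) l
              = (res ++ [pvOpenText l], decide ((c + 1) % 2 = 1)) := by
            simp [pvStepA, h2, h3, hf, h1]
          rw [hstep, ih]
          have hbare : pvBare l = true := by simpa [pvBare] using h1
          simp [pvSpecRun, pvIsFence, hf, hc, hbare]
        · simp only [Bool.or_eq_true, beq_iff_eq, not_or] at h1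
          have hstep : pvStepA (res, decide (c % 2 = 1)) l
              = (res ++ [l], decide ((c + 1) % 2 = 1)) := by
            simp [pvStepA, h2, h3, hf, h1.1, h1.2]
          rw [hstep, ih]
          have hbare : pvBare l = false := by simp [pvBare, h1.1, h1.2]
          simp [pvSpecRun, pvIsFence, hf, hbare]
      · have h2 : decide (c % 2 = 1) = true := by simp; omega
        have h3 : decide ((c + 1) % 2 = 1) = false := by simp; omega
        have hstep : pvStepA (res, decide (c % 2 = 1)) l
            = (res ++ [l], decide ((c + 1) % 2 = 1)) := by
          simp [pvStepA, h2, h3, hf]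
        rw [hstep, ih]
        simp [pvSpecRun, pvIsFence, hf, hc]
    · have hstep : pvStepA (res, decide (c % 2 = 1)) l
          = (res ++ [l], decide (c % 2 = 1)) := by
        simp [pvStepA, hf]
      rw [hstep, ih]
      simp [pvSpecRun, pvIsFence, hf]

-- B's map equals the counter run
set_option maxHeartbeats 1000000 in
lemma pvB_loop (lines : List String) (s : Int) (c : Nat) (O : List Int)
    (hO : ∀ i : Int, s ≤ i →
      (O.contains i = (if c % 2 = 0 then pvEveryOther (pvFenceIdx s lines)
                       else pvOdds (pvFenceIdx s lines)).contains i)) :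
    (PySem.List.enumerate lines s).map (fun p =>
        if O.contains p.1 && pvBare p.2 then pvOpenText p.2 else p.2)
      = pvSpecRun lines c := by
  induction lines generalizing s c O with
  | nil => simp [PySem.List.enumerate_nil, pvSpecRun]
  | cons l rest ih =>
    have hge := pvFenceIdx_ge (s + 1) rest
    simp only [PySem.List.enumerate_cons, List.map_cons, pvSpecRun]
    by_cases hf : pvIsFence l = true
    · by_cases hc : c % 2 = 0
      · -- opening fence: s is the head of the openers suffix
        have hsel : (if c % 2 = 0 then pvEveryOther (pvFenceIdx s (l :: rest))
                     else pvOdds (pvFenceIdx s (l :: rest)))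
            = s :: pvOdds (pvFenceIdx (s + 1) rest) := by
          cases h : pvFenceIdx (s + 1) rest with
          | nil => simp [hc, pvFenceIdx, hf, h, pvEveryOther, pvOdds]
          | cons a r => simp [hc, pvFenceIdx, hf, h, pvEveryOther, pvOdds]
        have hOs : O.contains s = true := by
          rw [hO s le_rfl, hsel]; simp
        have hhead : (if O.contains s && pvBare l then pvOpenText l else l)
            = (if pvIsFence l && (c % 2 == 0) && pvBare l then pvOpenText l else l) := by
          rw [hOs]; simp [hf, hc]
        rw [hhead]
        congr 1
        have hc' : ¬ (c + 1) % 2 = 0 := by omega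
        rw [ih (s + 1) (c + 1) O]
        · simp [hf]
        · intro i hi
          have hne : ¬ (i == s) = true := by simp; omega
          rw [hO i (by omega), hsel]
          simp only [List.contains_cons, hne, Bool.false_or, if_neg hc']
      · -- closing fence: s is not in the (even-position) openers
        have hsel : (if c % 2 = 0 then pvEveryOther (pvFenceIdx s (l :: rest))
                     else pvOdds (pvFenceIdx s (l :: rest)))
            = pvEveryOther (pvFenceIdx (s + 1) rest) := by
          simp [hc, pvFenceIdx, hf, pvOdds]
        have hOs : O.contains s = false := by
          rw [hO s le_rfl, hsel]
          simp only [List.contains_eq_mem, decide_eq_false_iff_not]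
          intro hmem
          have := hge s (pvMem_everyOther hmem); omega
        have hhead : (if O.contains s && pvBare l then pvOpenText l else l)
            = (if pvIsFence l && (c % 2 == 0) && pvBare l then pvOpenText l else l) := by
          rw [hOs]; simp [hc]
        rw [hhead]
        congr 1
        have hc' : (c + 1) % 2 = 0 := by omega
        rw [ih (s + 1) (c + 1) O]
        · simp [hf]
        · intro i hi
          rw [hO i (by omega), hsel]
          simp [hc']
    · -- not a fence line
      have hf' : pvIsFence l = false := by simpa using hf
      have hsel : pvFenceIdx s (l :: rest) = pvFenceIdx (s + 1) rest := by
        simp [pvFenceIdx, hf']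
      have hOs : O.contains s = false := by
        rw [hO s le_rfl, hsel]
        simp only [List.contains_eq_mem, decide_eq_false_iff_not]
        intro hmem
        split at hmem
        · have := hge s (pvMem_everyOther hmem); omega
        · have := hge s (pvMem_odds hmem); omega
      have hhead : (if O.contains s && pvBare l then pvOpenText l else l)
          = (if pvIsFence l && (c % 2 == 0) && pvBare l then pvOpenText l else l) := by
        rw [hOs]; simp [hf']
      rw [hhead]
      congr 1
      rw [ih (s + 1) c O]
      · simp [hf']
      · intro i hi
        rw [hO i (by omega), hsel]

-- ===== VERDICT (by name: the statement is the Claim_ definition above) =====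
theorem fix_code_fence_language_spec : Claim_equal_fix_code_fence_language := by
  unfold Claim_equal_fix_code_fence_language
  intro content _
  unfold Spec_fix_code_fence_language fix_code_fence_language fix_code_fence_language_alt
  simp only
  congr 1
  have hA' : (((PySem.Str.split? content "\n").getD []).foldl pvStepA ([], false)).1
      = pvSpecRun ((PySem.Str.split? content "\n").getD []) 0 := by
    have : (decide (0 % 2 = 1)) = false := by decide
    simpa [this] using pvA_loop ((PySem.Str.split? content "\n").getD []) [] 0
  rw [hA']
  rw [pvFilterMap_eq_fenceIdx]
  exact (pvB_loop ((PySem.Str.split? content "\n").getD []) 0 0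
    (pvEveryOther (pvFenceIdx 0 ((PySem.Str.split? content "\n").getD [])))
    (by intro i _; simp)).symm
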